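-- pv_equiv track=rewrite | github.com/MrBrantCode/unitest_baseline | mut_generate/mist_train_taco/taco_116/solution.py | compute_before_matrix
-- ===== SOURCE A (Python) =====
-- def compute_before_matrix(N, M, after):
--     # Initialize the before matrix with zeros
--     before = [[0 for _ in range(M)] for _ in range(N)]
--
--     # Set the value for the first cell
--     before[0][0] = after[0][0]
--
--     # Calculate the values for the first row
--     for i in range(1, M):
--         before[0][i] = after[0][i] - after[0][i - 1]
--
--     # Calculate the values for the first column
--     for i in range(1, N):
--         before[i][0] = after[i][0] - after[i - 1][0]
--
--     # Calculate the values for the rest of the matrix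
--     for i in range(1, N):
--         for j in range(1, M):
--             before[i][j] = after[i][j] - after[i - 1][j] - after[i][j - 1] + after[i - 1][j - 1]
--
--     return before
-- ===== SOURCE B (Python) =====
-- def compute_before_matrix(N, M, after):
--     # Two-stage differencing: the difference matrix is the horizontal
--     # (adjacent-column) difference of the vertical (adjacent-row) difference
--     # of the prefix-sum matrix.
--     rows = [after[i][:M] for i in range(N)]
--     vert = [rows[0]] + [[x - y for x, y in zip(r, p)] for p, r in zip(rows, rows[1:])]
--     return [[r[0]] + [x - y for x, y in zip(r[1:], r)] for r in vert]
-- ===== Notes on version B (the rewrite author's own statement) =====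
-- stated objective: simpler
-- what changed: Replaces the four region passes (corner, first row, first column, interior) that mutate a pre-built zero matrix with a two-stage zip pipeline: slice the first N rows to M columns, take adjacent-row differences, then adjacent-column differences of each row.
import Mathlib
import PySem

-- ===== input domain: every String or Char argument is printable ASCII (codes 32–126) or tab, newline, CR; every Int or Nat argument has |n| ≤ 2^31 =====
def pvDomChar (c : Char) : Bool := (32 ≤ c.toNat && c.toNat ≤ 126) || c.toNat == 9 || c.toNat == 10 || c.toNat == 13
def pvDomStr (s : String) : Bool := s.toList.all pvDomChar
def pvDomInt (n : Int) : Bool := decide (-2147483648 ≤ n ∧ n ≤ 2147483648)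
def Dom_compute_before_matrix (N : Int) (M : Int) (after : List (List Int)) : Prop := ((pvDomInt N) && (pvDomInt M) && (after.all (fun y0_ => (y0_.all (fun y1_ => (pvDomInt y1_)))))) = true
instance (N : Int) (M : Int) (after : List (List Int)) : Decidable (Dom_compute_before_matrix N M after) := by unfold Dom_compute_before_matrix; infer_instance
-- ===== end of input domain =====

-- B replaces A's four region passes over a mutated zero matrix with a two-stage
-- zip pipeline: vertical (adjacent-row) differences, then horizontal
-- (adjacent-column) differences of each row (objective: simpler).

-- ===== PORT A =====
-- after[i][j] read; total via defaults (in range under Pre_, where Python does not raise)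
def pvGetCell (after : List (List Int)) (i j : Int) : Int :=
  PySem.List.pyGetD (PySem.List.pyGetD after i []) j 0

-- before[i][j] = v (indices are nonnegative at every call site; in range under Pre_)
def pvSet2 (m : List (List Int)) (i j : Int) (v : Int) : List (List Int) :=
  m.set i.toNat ((m.getD i.toNat []).set j.toNat v)

def compute_before_matrix (N : Int) (M : Int) (after : List (List Int)) : List (List Int) :=
  -- before = [[0 for _ in range(M)] for _ in range(N)]
  let b0 := (PySem.List.pyRange 0 N 1).map (fun _ => (PySem.List.pyRange 0 M 1).map (fun _ => (0 : Int)))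
  -- before[0][0] = after[0][0]
  let b1 := pvSet2 b0 0 0 (pvGetCell after 0 0)
  -- for i in range(1, M): before[0][i] = after[0][i] - after[0][i-1]
  let b2 := (PySem.List.pyRange 1 M 1).foldl
    (fun b i => pvSet2 b 0 i (pvGetCell after 0 i - pvGetCell after 0 (i - 1))) b1
  -- for i in range(1, N): before[i][0] = after[i][0] - after[i-1][0]
  let b3 := (PySem.List.pyRange 1 N 1).foldl
    (fun b i => pvSet2 b i 0 (pvGetCell after i 0 - pvGetCell after (i - 1) 0)) b2
  -- for i in range(1, N): for j in range(1, M): before[i][j] = …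
  let b4 := (PySem.List.pyRange 1 N 1).foldl
    (fun b i => (PySem.List.pyRange 1 M 1).foldl
      (fun b j => pvSet2 b i j
        (pvGetCell after i j - pvGetCell after (i - 1) j - pvGetCell after i (j - 1)
          + pvGetCell after (i - 1) (j - 1))) b) b3
  b4

-- ===== PORT B =====
-- rows = [after[i][:M] for i in range(N)]
def pvRowsB (N : Int) (M : Int) (after : List (List Int)) : List (List Int) :=
  (PySem.List.pyRange 0 N 1).map
    (fun i => PySem.List.slice (PySem.List.pyGetD after i []) none (some M))

-- vert = [rows[0]] + [[x - y for x, y in zip(r, p)] for p, r in zip(rows, rows[1:])]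
-- (rows[0] read; total via default, in range under Pre_)
def pvVert (rows : List (List Int)) : List (List Int) :=
  rows.getD 0 [] ::
    (rows.zip (PySem.List.slice rows (some 1) none)).map
      (fun pr => (pr.2.zip pr.1).map (fun xy => xy.1 - xy.2))

-- [[r[0]] + [x - y for x, y in zip(r[1:], r)] for r in vert]
-- (r[0] read; total via default, in range under Pre_)
def pvHz (r : List Int) : List Int :=
  r.getD 0 0 :: ((PySem.List.slice r (some 1) none).zip r).map (fun xy => xy.1 - xy.2)

def compute_before_matrix_alt (N : Int) (M : Int) (after : List (List Int)) : List (List Int) :=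
  (pvVert (pvRowsB N M after)).map pvHz

-- ===== PRECONDITION & SPEC =====
-- Exactly the inputs on which the Python A returns: it indexes after[i][j] for all
-- 0 ≤ i < N, 0 ≤ j < M and writes before[0][0], so it raises IndexError unless
-- 1 ≤ N, 1 ≤ M, after has at least N rows and each of the first N rows has at least M entries.
def Pre_compute_before_matrix (N : Int) (M : Int) (after : List (List Int)) : Prop :=
  1 ≤ N ∧ 1 ≤ M ∧ N ≤ (after.length : Int) ∧
    ∀ row ∈ after.take N.toNat, M ≤ (row.length : Int)
instance (N : Int) (M : Int) (after : List (List Int)) : Decidable (Pre_compute_before_matrix N M after) := by unfold Pre_compute_before_matrix; infer_instance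

def pvWitness_compute_before_matrix : Int × Int × List (List Int) := (3, 2, [[1, 2], [2, 4], [4, 7]])

def Spec_compute_before_matrix (N : Int) (M : Int) (after : List (List Int)) (out : List (List Int)) : Prop := out = compute_before_matrix_alt N M after
instance (N : Int) (M : Int) (after : List (List Int)) (out : List (List Int)) : Decidable (Spec_compute_before_matrix N M after out) := by unfold Spec_compute_before_matrix; infer_instance

-- ===== CLAIM (what is proved, stated in full; the proofs are below) =====
def Claim_equal_compute_before_matrix : Prop := ∀ (N : Int) (M : Int) (after : List (List Int)), Dom_compute_before_matrix N M after → Pre_compute_before_matrix N M after → Spec_compute_before_matrix N M after (compute_before_matrix N M after)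

-- ===== LEMMAS AND PROOFS =====

-- one row of in-place writes at nonnegative column indices
theorem pv_rowFold_getElem? (l : List Int) (v : Int → Int) (row : List Int) (k : Nat)
    (hpos : ∀ x ∈ l, 0 ≤ x) :
    (l.foldl (fun r x => r.set x.toNat (v x)) row)[k]? =
      if (k : Int) ∈ l ∧ k < row.length then some (v k) else row[k]? := by
  induction l generalizing row with
  | nil => simp
  | cons x xs ih =>
    have hx : 0 ≤ x := hpos x (List.mem_cons_self ..)
    simp only [List.foldl_cons]
    rw [ih _ (fun y hy => hpos y (List.mem_cons_of_mem _ hy))]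
    simp only [List.length_set, List.mem_cons]
    by_cases hmem : (k : Int) ∈ xs
    · simp only [hmem, or_true, true_and]
      split_ifs with hlt
      · rfl
      · rw [List.getElem?_eq_none (by simp; omega), List.getElem?_eq_none (by omega)]
    · by_cases hxk : x.toNat = k
      · have hxe : (k : Int) = x := by omega
        subst hxe
        have h1 : (row.set ((k : Int)).toNat (v k))[k]? =
            if k < row.length then some (v k) else none := by
          simp [List.getElem?_set]
        rw [if_neg (by simp [hmem]), h1]
        by_cases hlt : k < row.length
        · rw [if_pos hlt, if_pos ⟨Or.inl rfl, hlt⟩]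
        · rw [if_neg hlt, if_neg (fun hc => hlt hc.2), List.getElem?_eq_none (by omega)]
      · have hne : (k : Int) ≠ x := by omega
        simp [hmem, hxk, hne]

-- a loop of writes confined to row i = one functional row update
theorem pv_inner (l : List Int) (i : Int) (v : Int → Int) (m : List (List Int)) :
    l.foldl (fun b j => pvSet2 b i j (v j)) m
      = m.set i.toNat (l.foldl (fun r x => r.set x.toNat (v x)) (m.getD i.toNat [])) := by
  induction l generalizing m with
  | nil =>
    by_cases h : i.toNat < m.length
    · simp [List.getD_eq_getElem?_getD, List.getElem?_eq_getElem h, List.set_getElem_self]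
    · rw [List.set_eq_of_length_le (by omega)]
      simp
  | cons x xs ih =>
    simp only [List.foldl_cons]
    rw [ih]
    simp only [pvSet2]
    by_cases h : i.toNat < m.length
    · rw [List.set_set]
      congr 1
      simp [List.getD_eq_getElem?_getD, List.getElem?_set_self h]
    · have hset : ∀ r : List Int, m.set i.toNat r = m :=
        fun r => List.set_eq_of_length_le (by omega)
      simp only [hset]

theorem pv_outerFold_length (l : List Int) (t : Int → List Int → List Int) (m : List (List Int)) :
    (l.foldl (fun b x => b.set x.toNat (t x (b.getD x.toNat []))) m).length = m.length := by
  induction l generalizing m with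
  | nil => rfl
  | cons x xs ih => rw [List.foldl_cons, ih, List.length_set]

-- a loop of row updates at distinct nonnegative row indices, observed at row k
theorem pv_outer (l : List Int) (t : Int → List Int → List Int) (m : List (List Int)) (k : Nat)
    (hpos : ∀ x ∈ l, 0 ≤ x) (hnd : l.Nodup) :
    (l.foldl (fun b x => b.set x.toNat (t x (b.getD x.toNat []))) m)[k]? =
      if (k : Int) ∈ l ∧ k < m.length then some (t k (m.getD k [])) else m[k]? := by
  induction l generalizing m with
  | nil => simp
  | cons x xs ih =>
    have hx : 0 ≤ x := hpos x (List.mem_cons_self ..)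
    have hxnotin : x ∉ xs := (List.nodup_cons.mp hnd).1
    simp only [List.foldl_cons]
    rw [ih _ (fun y hy => hpos y (List.mem_cons_of_mem _ hy)) hnd.of_cons]
    simp only [List.length_set, List.mem_cons]
    by_cases hmem : (k : Int) ∈ xs
    · have hkx : x.toNat ≠ k := by
        intro he
        have hx2 : x = (k : Int) := by omega
        subst hx2
        exact hxnotin hmem
      have hgd : (m.set x.toNat (t x (m.getD x.toNat []))).getD k [] = m.getD k [] := by
        simp [List.getD_eq_getElem?_getD, hkx]
      simp [hmem, hkx]
    · by_cases hxk : x.toNat = k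
      · have hxe : (k : Int) = x := by omega
        subst hxe
        have h1 : (m.set ((k : Int)).toNat (t k (m.getD ((k : Int)).toNat [])))[k]? =
            if k < m.length then some (t k (m.getD k [])) else none := by
          simp [List.getElem?_set]
        rw [if_neg (by simp [hmem]), h1]
        by_cases hlt : k < m.length
        · rw [if_pos hlt, if_pos ⟨Or.inl rfl, hlt⟩]
        · rw [if_neg hlt, if_neg (fun hc => hlt hc.2), List.getElem?_eq_none (by omega)]
      · have hne : (k : Int) ≠ x := by omega
        simp [hmem, hxk, hne]

-- specializations of pv_outer to the two row-update shapes A uses (first-order rewriting)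
theorem pv_outer4 (l : List Int) (v : Int → Int) (m : List (List Int)) (k : Nat)
    (hpos : ∀ x ∈ l, 0 ≤ x) (hnd : l.Nodup) :
    (l.foldl (fun b x => b.set x.toNat ((b.getD x.toNat []).set 0 (v x))) m)[k]? =
      if (k : Int) ∈ l ∧ k < m.length then some ((m.getD k []).set 0 (v k)) else m[k]? :=
  pv_outer l (fun x row => row.set 0 (v x)) m k hpos hnd

theorem pv_outer4_length (l : List Int) (v : Int → Int) (m : List (List Int)) :
    (l.foldl (fun b x => b.set x.toNat ((b.getD x.toNat []).set 0 (v x))) m).length = m.length :=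
  pv_outerFold_length l (fun x row => row.set 0 (v x)) m

theorem pv_outer5 (l cols : List Int) (v : Int → Int → Int) (m : List (List Int)) (k : Nat)
    (hpos : ∀ x ∈ l, 0 ≤ x) (hnd : l.Nodup) :
    (l.foldl (fun b x => b.set x.toNat
        (cols.foldl (fun r y => r.set y.toNat (v x y)) (b.getD x.toNat []))) m)[k]? =
      if (k : Int) ∈ l ∧ k < m.length then
        some (cols.foldl (fun r y => r.set y.toNat (v k y)) (m.getD k [])) else m[k]? :=
  pv_outer l (fun x row => cols.foldl (fun r y => r.set y.toNat (v x y)) row) m k hpos hnd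

-- the all-zero row and the rows A's passes produce
def pvZRow (M : Int) : List Int := (PySem.List.pyRange 0 M 1).map (fun _ => (0 : Int))

def pvRow0 (M : Int) (after : List (List Int)) : List Int :=
  (PySem.List.pyRange 1 M 1).foldl
    (fun r x => r.set x.toNat (pvGetCell after 0 x - pvGetCell after 0 (x - 1)))
    ((pvZRow M).set 0 (pvGetCell after 0 0))

def pvRowI (M : Int) (after : List (List Int)) (i : Int) : List Int :=
  (PySem.List.pyRange 1 M 1).foldl
    (fun r x => r.set x.toNat
      (pvGetCell after i x - pvGetCell after (i - 1) x - pvGetCell after i (x - 1)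
        + pvGetCell after (i - 1) (x - 1)))
    ((pvZRow M).set 0 (pvGetCell after i 0 - pvGetCell after (i - 1) 0))

-- proof helper: the guarded finite-difference cell value (0 outside the matrix)
def pvGetB (after : List (List Int)) (r c : Int) : Int :=
  if 0 ≤ r ∧ 0 ≤ c then PySem.List.pyGetD (PySem.List.pyGetD after r []) c 0 else 0

def pvCellB (after : List (List Int)) (i j : Int) : Int :=
  pvGetB after i j - pvGetB after (i - 1) j - pvGetB after i (j - 1) + pvGetB after (i - 1) (j - 1)

def pvBRow (M : Int) (after : List (List Int)) (i : Int) : List Int :=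
  (PySem.List.pyRange 0 M 1).map (pvCellB after i)

theorem pvZRow_length (M : Int) : (pvZRow M).length = M.toNat := by
  simp [pvZRow, PySem.List.length_pyRange_one]

theorem pvA_getElem? (N M : Int) (after : List (List Int)) (k : Nat)
    (hN : 1 ≤ N) (_hM : 1 ≤ M) :
    (compute_before_matrix N M after)[k]? =
      if k < N.toNat then some (if k = 0 then pvRow0 M after else pvRowI M after (k : Int))
      else none := by
  simp only [compute_before_matrix]
  simp only [pv_inner]
  simp only [pvSet2, Int.toNat_zero]
  rw [pv_outer5 _ _ _ _ _ (fun x hx => by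
        have := PySem.List.mem_pyRange_one.mp hx; omega) (PySem.List.nodup_pyRange_one 1 N),
      pv_outer4 _ _ _ _ (fun x hx => by
        have := PySem.List.mem_pyRange_one.mp hx; omega) (PySem.List.nodup_pyRange_one 1 N)]
  set b0 : List (List Int) :=
    (PySem.List.pyRange 0 N 1).map (fun _ => (PySem.List.pyRange 0 M 1).map (fun _ => (0 : Int)))
    with hb0def
  have hb0len : b0.length = N.toNat := by
    simp [hb0def, PySem.List.length_pyRange_one]
  have hN0 : 0 < N.toNat := by omega
  have hb0get : ∀ j : Nat, j < N.toNat → b0[j]? = some (pvZRow M) := by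
    intro j hj
    rw [hb0def, show N = ((N.toNat : Nat) : Int) from by omega,
      PySem.List.getElem?_map_pyRange_zero _ _ _ hj]
    rfl
  have hgd0 : b0.getD 0 [] = pvZRow M := by
    rw [List.getD_eq_getElem?_getD, hb0get 0 hN0]
    rfl
  rw [hgd0]
  rw [show ((b0.set 0 ((pvZRow M).set 0 (pvGetCell after 0 0))).getD 0 [])
        = (pvZRow M).set 0 (pvGetCell after 0 0) from by
      rw [List.getD_eq_getElem?_getD,
        List.getElem?_set_self (by rw [hb0len]; exact hN0)]
      rfl]
  rw [List.set_set]
  rw [show List.foldl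
        (fun r x => r.set x.toNat (pvGetCell after 0 x - pvGetCell after 0 (x - 1)))
        ((pvZRow M).set 0 (pvGetCell after 0 0)) (PySem.List.pyRange 1 M 1)
      = pvRow0 M after from rfl]
  rw [pv_outer4_length]
  have hb2len : (b0.set 0 (pvRow0 M after)).length = N.toNat := by
    rw [List.length_set, hb0len]
  rw [hb2len]
  by_cases hk : k < N.toNat
  · by_cases hk0 : k = 0
    · subst hk0
      rw [if_neg (by
        intro hc
        have := PySem.List.mem_pyRange_one.mp hc.1
        omega)]
      rw [if_neg (by
        intro hc
        have := PySem.List.mem_pyRange_one.mp hc.1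
        omega)]
      rw [List.getElem?_set_self (by rw [hb0len]; exact hN0), if_pos hN0, if_pos rfl]
    · have hk1 : 1 ≤ k := by omega
      rw [if_pos ⟨PySem.List.mem_pyRange_one.mpr ⟨by omega, by omega⟩, hk⟩]
      rw [List.getD_eq_getElem?_getD]
      rw [pv_outer4 _ _ _ _ (fun x hx => by
            have := PySem.List.mem_pyRange_one.mp hx; omega)
          (PySem.List.nodup_pyRange_one 1 N)]
      rw [if_pos ⟨PySem.List.mem_pyRange_one.mpr ⟨by omega, by omega⟩, by rw [hb2len]; exact hk⟩]
      rw [show ((b0.set 0 (pvRow0 M after)).getD k [])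
            = pvZRow M from by
          rw [List.getD_eq_getElem?_getD, List.getElem?_set,
            if_neg (by omega), hb0get k hk]
          rfl]
      rw [if_pos hk, if_neg hk0]
      rfl
  · rw [if_neg (fun hc => hk hc.2), if_neg (fun hc => hk hc.2)]
    rw [List.getElem?_set, if_neg (by omega), List.getElem?_eq_none (by omega), if_neg hk]

-- the k-th vertical-difference row of B's pipeline, as a function of k
def pvVRow (rows : List (List Int)) (k : Nat) : List Int :=
  if k = 0 then rows.getD 0 []
  else ((rows.getD k []).zip (rows.getD (k - 1) [])).map (fun xy => xy.1 - xy.2)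

theorem pvVert_length (rows : List (List Int)) (h : 1 ≤ rows.length) :
    (pvVert rows).length = rows.length := by
  simp [pvVert, PySem.List.slice_from_one, List.length_zip, List.length_tail]
  omega

theorem pvVert_getElem? (rows : List (List Int)) (k : Nat) (hk : k < rows.length) :
    (pvVert rows)[k]? = some (pvVRow rows k) := by
  unfold pvVert pvVRow
  rw [PySem.List.slice_from_one]
  cases k with
  | zero => simp
  | succ k' =>
    simp only [List.getElem?_cons_succ, List.getElem?_map, if_neg (Nat.succ_ne_zero k')]
    have hz : (rows.zip rows.tail)[k']? = some (rows[k'], rows[k' + 1]) := by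
      rw [List.getElem?_zip_eq_some]
      exact ⟨List.getElem?_eq_getElem (by omega), by
        rw [List.getElem?_tail]; exact List.getElem?_eq_getElem hk⟩
    rw [hz]
    have h1 : rows[k']? = some rows[k'] := List.getElem?_eq_getElem (by omega)
    have h2 : rows[k' + 1]? = some rows[k' + 1] := List.getElem?_eq_getElem hk
    simp [List.getD_eq_getElem?_getD, h1, h2]

theorem pvHz_getElem? (r : List Int) (j : Nat) :
    (pvHz r)[j]? =
      if j = 0 then some (r.getD 0 0)
      else if j < r.length then some (r.getD j 0 - r.getD (j - 1) 0) else none := by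
  unfold pvHz
  rw [PySem.List.slice_from_one]
  cases j with
  | zero => simp
  | succ j' =>
    simp only [List.getElem?_cons_succ, List.getElem?_map, if_neg (Nat.succ_ne_zero j')]
    by_cases hj : j' + 1 < r.length
    · have hz : (r.tail.zip r)[j']? = some (r[j' + 1], r[j']) := by
        rw [List.getElem?_zip_eq_some]
        exact ⟨by rw [List.getElem?_tail]; exact List.getElem?_eq_getElem hj,
          List.getElem?_eq_getElem (by omega)⟩
      rw [hz, if_pos hj]
      have h1 : r[j']? = some r[j'] := List.getElem?_eq_getElem (by omega)
      have h2 : r[j' + 1]? = some r[j' + 1] := List.getElem?_eq_getElem hj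
      simp [List.getD_eq_getElem?_getD, h1, h2]
    · rw [if_neg hj]
      have hz : (r.tail.zip r)[j']? = none := by
        apply List.getElem?_eq_none
        rw [List.length_zip, List.length_tail]
        omega
      rw [hz]
      rfl

theorem pvB_getElem? (N M : Int) (after : List (List Int)) (k : Nat)
    (hN : 1 ≤ N) (hM : 1 ≤ M) (hlen : N ≤ (after.length : Int))
    (hrow : ∀ row ∈ after.take N.toNat, M ≤ (row.length : Int)) :
    (compute_before_matrix_alt N M after)[k]? =
      if k < N.toNat then some (pvBRow M after (k : Int)) else none := by
  have hrowlen : ∀ i : Nat, i < N.toNat → M.toNat ≤ (after.getD i []).length := by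
    intro i hi
    have hil : i < after.length := by omega
    have hmem : after[i] ∈ after.take N.toNat := by
      have h2 : i < (after.take N.toNat).length := by
        rw [List.length_take]; omega
      have h3 : (after.take N.toNat)[i] = after[i] := List.getElem_take
      rw [← h3]
      exact List.getElem_mem h2
    have := hrow _ hmem
    rw [List.getD_eq_getElem?_getD, List.getElem?_eq_getElem hil]
    simp only [Option.getD_some]
    omega
  have hrows_len : (pvRowsB N M after).length = N.toNat := by
    simp [pvRowsB, PySem.List.length_pyRange_one]
  have hrows_get : ∀ i : Nat, i < N.toNat →
      (pvRowsB N M after)[i]? = some ((after.getD i []).take M.toNat) := by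
    intro i hi
    unfold pvRowsB
    rw [show N = ((N.toNat : Nat) : Int) from by omega,
      PySem.List.getElem?_map_pyRange_zero _ _ _ hi,
      PySem.List.pyGetD_natCast,
      show M = ((M.toNat : Nat) : Int) from by omega,
      PySem.List.slice_to_natCast]
    simp
    omega
  have hrows_getD : ∀ i : Nat, i < N.toNat →
      (pvRowsB N M after).getD i [] = (after.getD i []).take M.toNat := by
    intro i hi
    rw [List.getD_eq_getElem?_getD, hrows_get i hi]
    rfl
  have hrows_rowlen : ∀ i : Nat, i < N.toNat →
      ((pvRowsB N M after).getD i []).length = M.toNat := by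
    intro i hi
    rw [hrows_getD i hi, List.length_take]
    have := hrowlen i hi
    omega
  -- element of the taken row = the guarded cell read
  have hcell : ∀ i j : Nat, i < N.toNat → j < M.toNat →
      ((pvRowsB N M after).getD i []).getD j 0 = pvGetCell after (i : Int) (j : Int) := by
    intro i j hi hj
    rw [hrows_getD i hi]
    unfold pvGetCell
    rw [PySem.List.pyGetD_natCast, PySem.List.pyGetD_natCast,
      List.getD_eq_getElem?_getD, List.getD_eq_getElem?_getD]
    congr 1
    simp [hj]
  -- the k-th vertical row elementwise
  have hvrow_len : ∀ i : Nat, i < N.toNat → (pvVRow (pvRowsB N M after) i).length = M.toNat := by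
    intro i hi
    unfold pvVRow
    by_cases h0 : i = 0
    · rw [if_pos h0]
      exact hrows_rowlen 0 (by omega)
    · rw [if_neg h0, List.length_map, List.length_zip,
        hrows_rowlen i hi, hrows_rowlen (i - 1) (by omega)]
      omega
  have hvrow_getD : ∀ i j : Nat, i < N.toNat → j < M.toNat →
      (pvVRow (pvRowsB N M after) i).getD j 0 =
        pvGetCell after (i : Int) (j : Int) -
          (if i = 0 then 0 else pvGetCell after ((i : Int) - 1) (j : Int)) := by
    intro i j hi hj
    unfold pvVRow
    by_cases h0 : i = 0
    · rw [if_pos h0, if_pos h0, h0, hcell 0 j (by omega) hj]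
      ring
    · rw [if_neg h0, if_neg h0]
      have hl1 : j < ((pvRowsB N M after).getD i []).length := by rw [hrows_rowlen i hi]; omega
      have hl2 : j < ((pvRowsB N M after).getD (i - 1) []).length := by
        rw [hrows_rowlen (i - 1) (by omega)]; omega
      have hz : (((pvRowsB N M after).getD i []).zip ((pvRowsB N M after).getD (i - 1) []))[j]? =
          some (((pvRowsB N M after).getD i [])[j], ((pvRowsB N M after).getD (i - 1) [])[j]) := by
        rw [List.getElem?_zip_eq_some]
        exact ⟨List.getElem?_eq_getElem hl1, List.getElem?_eq_getElem hl2⟩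
      have e1 : ((pvRowsB N M after).getD i []).getD j 0 = ((pvRowsB N M after).getD i [])[j] := by
        rw [List.getD_eq_getElem?_getD, List.getElem?_eq_getElem hl1]; rfl
      have e2 : ((pvRowsB N M after).getD (i - 1) []).getD j 0 = ((pvRowsB N M after).getD (i - 1) [])[j] := by
        rw [List.getD_eq_getElem?_getD, List.getElem?_eq_getElem hl2]; rfl
      rw [List.getD_eq_getElem?_getD, List.getElem?_map, hz]
      simp only [Option.map_some, Option.getD_some]
      rw [← e1, ← e2, hcell i j hi hj, hcell (i - 1) j (by omega) hj,
        show (((i : Nat) - 1 : Nat) : Int) = (i : Int) - 1 from by omega]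
  -- assemble
  unfold compute_before_matrix_alt
  rw [List.getElem?_map]
  by_cases hk : k < N.toNat
  · rw [if_pos hk, pvVert_getElem? _ k (by rw [hrows_len]; omega)]
    simp only [Option.map_some, Option.some.injEq]
    apply List.ext_getElem?
    intro j
    rw [pvHz_getElem?]
    have hbrow : (pvBRow M after (k : Int))[j]? =
        if j < M.toNat then some (pvCellB after (k : Int) (j : Int)) else none := by
      unfold pvBRow
      by_cases hj : j < M.toNat
      · rw [if_pos hj, show M = ((M.toNat : Nat) : Int) from by omega,
          PySem.List.getElem?_map_pyRange_zero _ _ _ hj]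
      · rw [if_neg hj]
        apply List.getElem?_eq_none
        simp [PySem.List.length_pyRange_one]
        omega
    rw [hbrow]
    by_cases hj : j < M.toNat
    · rw [if_pos hj]
      by_cases hj0 : j = 0
      · subst hj0
        rw [if_pos rfl, hvrow_getD k 0 hk (by omega)]
        simp only [pvCellB, pvGetB, Option.some.injEq]
        split_ifs <;> first | omega | (simp [pvGetCell]; try ring)
      · rw [if_neg hj0, if_pos (by rw [hvrow_len k hk]; omega),
          hvrow_getD k j hk hj, hvrow_getD k (j - 1) hk (by omega),
          show (((j : Nat) - 1 : Nat) : Int) = (j : Int) - 1 from by omega]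
        simp only [pvCellB, pvGetB, Option.some.injEq]
        split_ifs <;> first | omega | (simp [pvGetCell]; try ring)
    · rw [if_neg hj, if_neg (by omega), if_neg (by rw [hvrow_len k hk]; omega)]
  · rw [if_neg hk]
    rw [List.getElem?_eq_none (by rw [pvVert_length _ (by rw [hrows_len]; omega), hrows_len]; omega)]
    rfl

theorem pvRow0_eq (M : Int) (after : List (List Int)) (hM : 1 ≤ M) :
    pvRow0 M after = pvBRow M after 0 := by
  apply List.ext_getElem?
  intro j
  unfold pvRow0 pvBRow
  rw [pv_rowFold_getElem? _ _ _ j (fun x hx => by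
    have := PySem.List.mem_pyRange_one.mp hx; omega)]
  by_cases hj : j < M.toNat
  · rw [show M = ((M.toNat : Nat) : Int) from by omega,
      PySem.List.getElem?_map_pyRange_zero _ _ _ hj]
    by_cases hj0 : j = 0
    · subst hj0
      rw [if_neg (by
        intro hc
        have := PySem.List.mem_pyRange_one.mp hc.1
        omega)]
      rw [List.getElem?_set_self (by rw [pvZRow_length]; omega)]
      simp only [pvCellB, pvGetB, pvGetCell]
      split_ifs <;> first | omega | (congr 1; try ring_nf)
    · have hj1 : 1 ≤ j := by omega
      rw [if_pos ⟨PySem.List.mem_pyRange_one.mpr ⟨by omega, by omega⟩,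
        by rw [List.length_set, pvZRow_length]; omega⟩]
      simp only [pvCellB, pvGetB, pvGetCell]
      split_ifs <;> first | omega | (congr 1; try ring_nf)
  · rw [if_neg (by
      intro hc
      rw [List.length_set, pvZRow_length] at hc
      omega)]
    rw [List.getElem?_eq_none (by rw [List.length_set, pvZRow_length]; omega),
      List.getElem?_eq_none (by simp [PySem.List.length_pyRange_one]; omega)]

theorem pvRowI_eq (M : Int) (after : List (List Int)) (i : Int) (hM : 1 ≤ M) (hi : 1 ≤ i) :
    pvRowI M after i = pvBRow M after i := by
  apply List.ext_getElem?
  intro j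
  unfold pvRowI pvBRow
  rw [pv_rowFold_getElem? _ _ _ j (fun x hx => by
    have := PySem.List.mem_pyRange_one.mp hx; omega)]
  by_cases hj : j < M.toNat
  · rw [show M = ((M.toNat : Nat) : Int) from by omega,
      PySem.List.getElem?_map_pyRange_zero _ _ _ hj]
    by_cases hj0 : j = 0
    · subst hj0
      rw [if_neg (by
        intro hc
        have := PySem.List.mem_pyRange_one.mp hc.1
        omega)]
      rw [List.getElem?_set_self (by rw [pvZRow_length]; omega)]
      simp only [pvCellB, pvGetB, pvGetCell]
      split_ifs <;> first | omega | (congr 1; try ring_nf)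
    · have hj1 : 1 ≤ j := by omega
      rw [if_pos ⟨PySem.List.mem_pyRange_one.mpr ⟨by omega, by omega⟩,
        by rw [List.length_set, pvZRow_length]; omega⟩]
      simp only [pvCellB, pvGetB, pvGetCell]
      split_ifs <;> first | omega | (congr 1; try ring_nf)
  · rw [if_neg (by
      intro hc
      rw [List.length_set, pvZRow_length] at hc
      omega)]
    rw [List.getElem?_eq_none (by rw [List.length_set, pvZRow_length]; omega),
      List.getElem?_eq_none (by simp [PySem.List.length_pyRange_one]; omega)]

-- ===== VERDICT (by name: the statement is the Claim_ definition above) =====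
theorem compute_before_matrix_spec : Claim_equal_compute_before_matrix := by
  intro N M after _ hpre
  obtain ⟨hN, hM, hlen, hrow⟩ := hpre
  unfold Spec_compute_before_matrix
  apply List.ext_getElem?
  intro k
  rw [pvA_getElem? N M after k hN hM, pvB_getElem? N M after k hN hM hlen hrow]
  by_cases hk : k < N.toNat
  · rw [if_pos hk, if_pos hk]
    by_cases hk0 : k = 0
    · subst hk0
      simp [pvRow0_eq M after hM]
    · rw [if_neg hk0, pvRowI_eq M after (k : Int) hM (by omega)]
  · rw [if_neg hk, if_neg hk]
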